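-- pv_equiv track=rewrite | github.com/Maelllm/hillel_python_pro | task_12/task_12_2.py | new_format
-- ===== SOURCE A (Python) =====
-- def new_format(string):
--     i = 0
--     string_2 = ""
--     while i < len(string):
--         if i % 3 == 0 and i != 0:
--             string_2 += "."
--         string_2 += string[::-1][i]
--         i += 1
--     return string_2[::-1]
-- ===== SOURCE B (Python) =====
-- def new_format(string):
--     chunks = []
--     while string:
--         chunks.append(string[-3:])
--         string = string[:-3]
--     return ".".join(reversed(chunks))
-- ===== Notes on version B (the rewrite author's own statement) =====
-- stated objective: faster
-- what changed: Replaces A's per-character walk that rebuilds the reversed string on every iteration and inserts a dot via a modulo index test with a loop that slices 3-character chunks off the right and dot-joins the reversed chunk list.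
import Mathlib
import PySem

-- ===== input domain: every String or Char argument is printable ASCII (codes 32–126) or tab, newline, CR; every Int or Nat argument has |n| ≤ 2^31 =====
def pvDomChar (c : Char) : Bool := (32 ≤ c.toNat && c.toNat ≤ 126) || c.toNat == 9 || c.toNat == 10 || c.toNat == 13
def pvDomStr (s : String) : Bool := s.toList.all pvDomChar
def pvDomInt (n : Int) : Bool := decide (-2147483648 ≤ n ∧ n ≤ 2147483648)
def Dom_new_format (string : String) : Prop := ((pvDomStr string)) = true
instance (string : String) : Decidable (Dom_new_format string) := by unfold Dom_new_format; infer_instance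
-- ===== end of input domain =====

-- B replaces A's per-character reversed-index walk with modulo dot insertion by a
-- group-oriented loop slicing 3-char chunks off the right and dot-joining them;
-- objective: faster (A rebuilds the reversed string on every iteration).


-- ===== PORT A =====
-- A's while loop: i walks 0..len-1; a '.' is appended when i % 3 == 0 ∧ i ≠ 0,
-- then string[::-1][i] is appended; the final string is reversed.
-- rev.getD i ' ' is exact here: the loop only reads i < n = rev.length.
def newFormatLoopA (rev : List Char) (n i : Nat) (acc : List Char) : List Char :=
  if _ : i < n then
    newFormatLoopA rev n (i + 1)
      ((if i % 3 == 0 && i != 0 then acc ++ ['.'] else acc) ++ [rev.getD i ' '])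
  else acc
termination_by n - i

def new_format (string : String) : String :=
  String.mk ((newFormatLoopA string.toList.reverse string.toList.length 0 []).reverse)

-- ===== PORT B =====
-- B's while loop: append string[-3:] to chunks, cut string to string[:-3].
def chunksB (l : List Char) : List (List Char) :=
  if _ : l = [] then []
  else l.drop (l.length - 3) :: chunksB (l.take (l.length - 3))
termination_by l.length
decreasing_by
  rename_i h
  have : l.length ≠ 0 := fun h0 => h (List.length_eq_zero_iff.mp h0)
  simp [List.length_take]; omega

-- dot-join of reversed(chunks)
def new_format_alt (string : String) : String :=
  String.mk (List.intercalate ['.'] (chunksB string.toList).reverse)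

-- ===== PRECONDITION & SPEC =====
def Spec_new_format (string : String) (out : String) : Prop := out = new_format_alt string
instance (string : String) (out : String) : Decidable (Spec_new_format string out) := by unfold Spec_new_format; infer_instance

-- ===== CLAIM (what is proved, stated in full; the proofs are below) =====
def Claim_equal_new_format : Prop := ∀ (string : String), Dom_new_format string → Spec_new_format string (new_format string)

-- ===== LEMMAS AND PROOFS =====

-- groups of 3 from the front (proof-only reference structure)
def grp (r : List Char) : List (List Char) :=
  if _ : r = [] then [] else r.take 3 :: grp (r.drop 3)
termination_by r.length
decreasing_by
  rename_i h
  have : r.length ≠ 0 := by simpa [List.length_eq_zero_iff] using h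
  simp; omega

-- per-character spine of A's loop, consuming the remaining reversed list
def spine (j : Nat) (r : List Char) : List Char :=
  match r with
  | [] => []
  | c :: t => (if j % 3 == 0 && j != 0 then ['.'] else []) ++ [c] ++ spine (j + 1) t

lemma newFormatLoopA_eq_spine (rev : List Char) (i : Nat) (acc : List Char) :
    newFormatLoopA rev rev.length i acc = acc ++ spine i (rev.drop i) := by
  by_cases h : i < rev.length
  · rw [newFormatLoopA]
    simp only [h, dif_pos]
    rw [newFormatLoopA_eq_spine rev (i + 1)]
    rw [List.drop_eq_getElem_cons h, spine]
    simp [List.getD_eq_getElem?_getD, h]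
    split <;> simp
  · rw [newFormatLoopA]
    simp only [h, dif_neg, not_false_iff]
    rw [List.drop_of_length_le (by omega), spine]
    simp
termination_by rev.length - i

lemma intercalate_cons2 (s a b : List Char) (t : List (List Char)) :
    List.intercalate s (a :: b :: t) = a ++ s ++ List.intercalate s (b :: t) := by
  simp [List.intercalate, List.intersperse]

lemma grp_nil : grp ([] : List Char) = [] := by rw [grp]; simp

lemma grp_cons3 (c c2 c3 : Char) (t : List Char) :
    grp (c :: c2 :: c3 :: t) = [c, c2, c3] :: grp t := by
  rw [grp]; simp

lemma grp_eq_nil (r : List Char) : grp r = [] ↔ r = [] := by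
  constructor
  · intro h; by_contra hr; rw [grp] at h; simp [hr] at h
  · intro h; subst h; exact grp_nil

lemma spine_eq_intercalate (r : List Char) (j : Nat) (hj : j % 3 = 0) :
    spine j r = (if j ≠ 0 ∧ r ≠ [] then ['.'] else []) ++ List.intercalate ['.'] (grp r) := by
  match r with
  | [] => simp [spine, grp_nil, List.intercalate]
  | [c] =>
    rw [grp]
    by_cases hj0 : j = 0 <;>
      simp [spine, grp_nil, List.intercalate, hj, hj0]
  | [c, c2] =>
    have h1 : (j + 1) % 3 = 1 := by omega
    rw [grp]
    by_cases hj0 : j = 0 <;>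
      simp [spine, grp_nil, List.intercalate, hj, hj0, h1]
  | c :: c2 :: c3 :: t3 =>
    have h1 : (j + 1) % 3 = 1 := by omega
    have h2 : (j + 1 + 1) % 3 = 2 := by omega
    have h3 : (j + 3) % 3 = 0 := by omega
    have ih := spine_eq_intercalate t3 (j + 3) h3
    rw [grp_cons3]
    by_cases ht : t3 = []
    · subst ht
      by_cases hj0 : j = 0 <;>
        simp [spine, grp_nil, List.intercalate, hj, hj0, h1, h2]
    · have hg : grp t3 ≠ [] := fun h => ht ((grp_eq_nil t3).mp h)
      obtain ⟨g, gs, hgs⟩ := List.exists_cons_of_ne_nil hg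
      rw [hgs, intercalate_cons2]
      simp only [spine, ih, hgs]
      by_cases hj0 : j = 0 <;>
        simp [hj, hj0, h1, h2, ht]
termination_by r.length

lemma chunksB_eq_grp (l : List Char) :
    chunksB l = (grp l.reverse).map List.reverse := by
  by_cases h : l = []
  · subst h; rw [chunksB, grp]; simp
  · rw [chunksB]
    have hrev : l.reverse ≠ [] := by simpa using h
    rw [grp]
    have hlen : l.reverse.length = l.length := List.length_reverse
    have h1 : l.drop (l.length - 3) = (l.reverse.take 3).reverse := by
      rw [List.take_reverse]; simp
    have h2 : l.reverse.drop 3 = (l.take (l.length - 3)).reverse := by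
      rw [List.drop_reverse]
    have ih := chunksB_eq_grp (l.take (l.length - 3))
    simp only [h, hrev, dif_neg, not_false_iff, List.map_cons]
    rw [h1, h2, ih]
termination_by l.length
decreasing_by
  have : l.length ≠ 0 := fun h0 => h (List.length_eq_zero_iff.mp h0)
  simp [List.length_take]; omega

lemma intercalate_append_singleton (s x : List Char) (M : List (List Char)) :
    List.intercalate s (M ++ [x]) = if M = [] then x else List.intercalate s M ++ s ++ x := by
  match M with
  | [] => simp [List.intercalate]
  | [a] => simp [List.intercalate, List.intersperse]
  | a :: b :: t =>
    have ih := intercalate_append_singleton s x (b :: t)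
    simp only [List.cons_append, if_neg (List.cons_ne_nil b t)] at ih
    rw [List.cons_append, List.cons_append, intercalate_cons2, ih, intercalate_cons2]
    simp

lemma reverse_intercalate (L : List (List Char)) :
    (List.intercalate ['.'] L).reverse = List.intercalate ['.'] ((L.map List.reverse).reverse) := by
  match L with
  | [] => simp [List.intercalate]
  | [a] => simp [List.intercalate]
  | a :: b :: t =>
    have ih := reverse_intercalate (b :: t)
    have h1 : ((a :: b :: t).map List.reverse).reverse
        = ((b :: t).map List.reverse).reverse ++ [a.reverse] := by simp
    rw [intercalate_cons2, h1, intercalate_append_singleton, if_neg (by simp), ← ih]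
    simp

-- ===== VERDICT (by name: the statement is the Claim_ definition above) =====
theorem new_format_spec : Claim_equal_new_format := by
  intro s _
  unfold Spec_new_format new_format new_format_alt
  rw [show s.toList.length = s.toList.reverse.length by simp,
      newFormatLoopA_eq_spine s.toList.reverse 0 []]
  simp only [List.drop_zero, List.nil_append]
  rw [spine_eq_intercalate _ 0 rfl]
  simp only [ne_eq, not_true_eq_false, false_and, if_false, List.nil_append]
  rw [chunksB_eq_grp, reverse_intercalate]
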